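-- pv_equiv track=rewrite | github.com/TanmayKumar-EngStud/CryptographyPy | Modern Cryptosystem/DEStrail3.py | HexA
-- ===== SOURCE A (Python) =====
-- def BlocksCreation(plainText):
--   block=[]
--   while len(plainText)%8 != 0:
--     plainText+=" "
--   for i in range(0,len(plainText),8):
--     block.append(plainText[i:i+8])
--   return block
--
-- def HexA(plainText): #Working well
--   plainText = BlocksCreation(plainText)
--   result =[]
--   ans = ""
--   for plain in plainText:
--     ans+= hex(ord(plain[0]))[2:]
--     for i in range(1,len(plain)):
--       ans+=" "
--       ans+= hex(ord(plain[i]))[2:]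
--     result.append(ans)
--     ans = ""
--   return result
-- ===== SOURCE B (Python) =====
-- def HexA(plainText):
--     pad = (-len(plainText)) % 8
--     tokens = [format(ord(c), "x") for c in plainText + " " * pad]
--     out = []
--     i = 0
--     while i < len(tokens):
--         out.append(" ".join(tokens[i:i+8]))
--         i += 8
--     return out
-- ===== Notes on version B (the rewrite author's own statement) =====
-- stated objective: simpler
-- what changed: Replaces A's block-then-char nested loops (building each line by string concatenation over index ranges) with one flat pass producing a hex token per character of the padded text, then grouping tokens eight at a time and joining each group.
import Mathlib
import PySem

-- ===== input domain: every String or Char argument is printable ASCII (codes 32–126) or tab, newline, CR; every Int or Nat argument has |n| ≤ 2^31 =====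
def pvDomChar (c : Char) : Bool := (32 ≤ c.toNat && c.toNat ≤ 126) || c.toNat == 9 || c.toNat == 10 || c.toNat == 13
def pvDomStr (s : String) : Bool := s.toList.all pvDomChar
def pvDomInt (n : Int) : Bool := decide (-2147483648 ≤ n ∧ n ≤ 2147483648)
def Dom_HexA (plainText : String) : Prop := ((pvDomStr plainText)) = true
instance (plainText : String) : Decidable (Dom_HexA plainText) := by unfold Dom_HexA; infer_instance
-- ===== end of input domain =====

-- B pads once, emits one flat hex-token list in a single pass, then groups it 8-at-a-time,
-- instead of A's block-then-char nested loops; objective: simpler decomposition (same cost).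

-- shared helper: hex(ord(c))[2:] for a nonnegative code, lowercase, no leading zero (exact for n ≥ 0)
def hexDigit (n : Nat) : Char := if n < 10 then Char.ofNat (48 + n) else Char.ofNat (87 + n)

def hexChars (n : Nat) : List Char :=
  if h : n < 16 then [hexDigit n] else hexChars (n / 16) ++ [hexDigit (n % 16)]
termination_by n
decreasing_by omega

def hexOfChar (c : Char) : List Char := hexChars c.toNat

-- ===== PORT A =====
-- while len(plainText)%8 != 0: plainText += " "
def blocksPad (s : List Char) : List Char :=
  if s.length % 8 ≠ 0 then blocksPad (s ++ [' ']) else s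
termination_by (8 - s.length % 8) % 8
decreasing_by simp only [List.length_append, List.length_cons, List.length_nil]; omega

-- ans = hex(ord(plain[0]))[2:]; for i in range(1,len(plain)): ans += " "; ans += hex(ord(plain[i]))[2:]
-- (plain[i] is in range on every reachable block; pyGetD with an arbitrary default ' ' ports the in-range access)
def rowA (plain : List Char) : List Char :=
  List.foldl (fun ans i => ans ++ [' '] ++ hexOfChar (PySem.List.pyGetD plain i ' '))
    (hexOfChar (PySem.List.pyGetD plain 0 ' '))
    (PySem.List.pyRange 1 (PySem.List.len plain) 1)

def HexA (plainText : String) : List String :=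
  let padded := blocksPad plainText.toList
  let blocks := List.foldl
      (fun b i => b ++ [PySem.List.slice padded (some i) (some (i + 8))]) []
      (PySem.List.pyRange 0 (PySem.List.len padded) 8)
  List.foldl (fun result plain => result ++ [String.mk (rowA plain)]) [] blocks

-- ===== PORT B =====
-- i = 0; while i < len(tokens): out.append(" ".join(tokens[i:i+8])); i += 8
def chunksJoin (ts : List (List Char)) (i : Nat) : List String :=
  if h : i < ts.length then
    String.mk (List.intercalate [' '] (PySem.List.slice ts (some (i : Int)) (some ((i : Int) + 8))))
      :: chunksJoin ts (i + 8)
  else []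
termination_by ts.length - i

def HexA_alt (plainText : String) : List String :=
  let s := plainText.toList
  let pad := (PySem.Int.mod (-(PySem.Str.len plainText)) 8).toNat   -- (-len(plainText)) % 8
  let tokens := (s ++ List.replicate pad ' ').map hexOfChar
  chunksJoin tokens 0

-- ===== PRECONDITION & SPEC =====
def Spec_HexA (plainText : String) (out : List String) : Prop := out = HexA_alt plainText
instance (plainText : String) (out : List String) : Decidable (Spec_HexA plainText out) := by unfold Spec_HexA; infer_instance

-- ===== CLAIM (what is proved, stated in full; the proofs are below) =====
def Claim_equal_HexA : Prop := ∀ (plainText : String), Dom_HexA plainText → Spec_HexA plainText (HexA plainText)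

-- ===== LEMMAS AND PROOFS =====

-- proof-side view of B's grouping on an explicit token list
def joinView (ts : List (List Char)) : List String :=
  if h : ts.isEmpty then [] else
    String.mk (List.intercalate [' '] (ts.take 8)) :: joinView (ts.drop 8)
termination_by ts.length
decreasing_by
  simp only [List.length_drop]
  have : 0 < ts.length := List.length_pos_iff.mpr (by simpa [List.isEmpty_iff] using h)
  omega

-- proof-side view of B's grouping, on the raw characters
def chunksList (l : List Char) : List (List Char) :=
  if h : l.isEmpty then [] else l.take 8 :: chunksList (l.drop 8)
termination_by l.length
decreasing_by
  simp only [List.length_drop]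
  have : 0 < l.length := List.length_pos_iff.mpr (by simpa [List.isEmpty_iff] using h)
  omega

theorem blocksPad_eq (s : List Char) :
    blocksPad s = s ++ List.replicate ((8 - s.length % 8) % 8) ' ' := by
  induction s using blocksPad.induct with
  | case1 s h ih =>
      rw [blocksPad, if_pos h, ih]
      simp only [List.length_append, List.length_cons, List.length_nil, List.append_assoc]
      congr 1
      have h2 : (8 - (s.length + 1) % 8) % 8 + 1 = (8 - s.length % 8) % 8 := by omega
      rw [← h2, List.replicate_succ]
      simp
  | case2 s h =>
      rw [blocksPad, if_neg h]
      have : s.length % 8 = 0 := by omega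
      simp [this]
theorem padB_eq (n : Nat) : ((PySem.Int.mod (-(n : Int)) 8).toNat) = (8 - n % 8) % 8 := by
  rw [PySem.Int.mod_eq_emod_of_pos (by norm_num)]
  omega
theorem blocks_eq (k : Nat) (p : List Char) (hp : p.length = 8 * k) :
    (PySem.List.pyRange 0 (PySem.List.len p) 8).map
        (fun i => PySem.List.slice p (some i) (some (i + 8)))
      = chunksList p := by
  induction k generalizing p with
  | zero =>
      have hnil : p = [] := List.eq_nil_of_length_eq_zero (by omega)
      subst hnil
      rw [chunksList]
      simp [PySem.List.pyRange_of_pos 0 0 (by norm_num : (0:Int) < 8), PySem.List.len]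
  | succ k ih =>
      have hlt : (0:Int) < PySem.List.len p := by simp [PySem.List.len_eq]; omega
      rw [PySem.List.pyRange_of_pos 0 (PySem.List.len p) (by norm_num : (0:Int) < 8)]
      rw [if_pos (by simpa using hlt)]
      have hcount : ((PySem.List.len p - 0 + 8 - 1) / 8).toNat = k + 1 := by
        simp [PySem.List.len_eq, hp]; omega
      rw [hcount, List.map_map, List.range_succ_eq_map, List.map_cons, List.map_map]
      rw [chunksList, dif_neg (by simp [List.isEmpty_iff]; intro h; simp [h] at hp)]
      congr 1
      · show PySem.List.slice p (some (0 + 8 * (0:Nat))) (some (0 + 8 * (0:Nat) + 8)) = p.take 8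
        norm_num
        simpa using PySem.List.slice_natCast_add p 0 8
      · rw [← ih (p.drop 8) (by simp [hp]; omega)]
        rw [PySem.List.pyRange_of_pos 0 (PySem.List.len (p.drop 8)) (by norm_num : (0:Int) < 8)]
        by_cases hk : k = 0
        · subst hk
          simp [PySem.List.len_eq, hp]
        · rw [if_pos (by simp [PySem.List.len_eq, hp]; omega)]
          have : ((PySem.List.len (p.drop 8) - 0 + 8 - 1) / 8).toNat = k := by
            simp [PySem.List.len_eq, hp]; omega
          rw [this, List.map_map]
          apply List.map_congr_left
          intro j hj
          simp only [Function.comp_apply, Nat.succ_eq_add_one]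
          have e1 : (0 + 8 * ((j+1 : Nat) : Int)) = ((8 + 8*j : Nat) : Int) := by push_cast; ring
          have e3 : (0 + 8 * ((j : Nat) : Int)) = ((8*j : Nat) : Int) := by push_cast; ring
          rw [e1, e3, show ((8:Int)) = ((8:Nat):Int) from by norm_num,
             PySem.List.slice_natCast_add, PySem.List.slice_natCast_add]
          rw [List.drop_drop]
theorem intercalate_eq (c : Char) (cs : List Char) :
    List.intercalate [' '] ((c :: cs).map hexOfChar)
      = hexOfChar c ++ cs.flatMap (fun x => ' ' :: hexOfChar x) := by
  induction cs generalizing c with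
  | nil => simp [List.intercalate]
  | cons d cs ih =>
      simp only [List.map_cons, List.intercalate, List.intersperse_cons₂,
        List.flatten_cons, List.flatMap_cons] at *
      rw [ih d]
      simp
theorem rowA_eq (c : Char) (cs : List Char) :
    rowA (c :: cs) = List.intercalate [' '] ((c :: cs).map hexOfChar) := by
  unfold rowA
  rw [intercalate_eq]
  rw [PySem.List.foldl_pyRange_pyGetD (c :: cs) ' '
        (fun ans x => ans ++ [' '] ++ hexOfChar x) _ (by norm_num)]
  simp only [List.append_assoc, List.singleton_append]
  rw [PySem.List.foldl_append_eq_flatMap (fun x => ' ' :: hexOfChar x)]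
  congr 1
  simp [PySem.List.pyGetD]
theorem chunksJoin_drop (ts : List (List Char)) (i : Nat) :
    chunksJoin ts i = joinView (ts.drop i) := by
  induction i using chunksJoin.induct ts with
  | case1 i h ih =>
      have hv : joinView (ts.drop i)
          = String.mk (List.intercalate [' '] ((ts.drop i).take 8))
            :: joinView ((ts.drop i).drop 8) := by
        rw [joinView, dif_neg (by simp [List.isEmpty_iff, List.drop_eq_nil_iff]; omega)]
      rw [chunksJoin, dif_pos h, ih, hv, List.drop_drop]
      congr 2
      rw [show ((i : Int) + 8) = ((i : Int) + ((8 : Nat) : Int)) from by norm_num,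
          PySem.List.slice_natCast_add]
  | case2 i h =>
      rw [chunksJoin, dif_neg h, List.drop_eq_nil_of_le (by omega), joinView]
      simp

theorem joinView_eq (k : Nat) (p : List Char) (hp : p.length = 8 * k) :
    joinView (p.map hexOfChar)
      = (chunksList p).map (fun ch => String.mk (List.intercalate [' '] (ch.map hexOfChar))) := by
  induction k generalizing p with
  | zero =>
      have : p = [] := List.eq_nil_of_length_eq_zero (by omega)
      subst this
      rw [joinView, chunksList]; simp
  | succ k ih =>
      have hne : p ≠ [] := by intro h; simp [h] at hp
      rw [joinView, chunksList, dif_neg (by simpa [List.isEmpty_iff] using hne),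
          dif_neg (by simpa [List.isEmpty_iff] using hne)]
      rw [List.map_cons, ← List.map_take, ← List.map_drop]
      congr 1
      exact ih (p.drop 8) (by simp [hp]; omega)
theorem chunks_ne_nil (k : Nat) (p : List Char) (hp : p.length = 8 * k) :
    ∀ ch ∈ chunksList p, ch ≠ [] := by
  induction k generalizing p with
  | zero =>
      have : p = [] := List.eq_nil_of_length_eq_zero (by omega)
      subst this; rw [chunksList]; simp
  | succ k ih =>
      have hne : p ≠ [] := by intro h; simp [h] at hp
      rw [chunksList, dif_neg (by simpa [List.isEmpty_iff] using hne)]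
      intro ch hch
      rw [List.mem_cons] at hch
      rcases hch with h | h
      · subst h
        intro hnil
        have := congrArg List.length hnil
        simp only [List.length_take, List.length_nil] at this
        omega
      · exact ih (p.drop 8) (by simp [hp]; omega) ch h

-- ===== VERDICT (by name: the statement is the Claim_ definition above) =====
theorem HexA_spec : Claim_equal_HexA := by
  intro plainText _
  unfold Spec_HexA HexA HexA_alt
  simp only [PySem.Str.len_eq, padB_eq, blocksPad_eq]
  rw [PySem.List.foldl_append_singleton_eq_map, PySem.List.foldl_append_singleton_eq_map,
      List.nil_append, List.nil_append]
  set p := plainText.toList ++ List.replicate ((8 - plainText.toList.length % 8) % 8) ' ' with hpdef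
  have hk : ∃ k, p.length = 8 * k := by
    refine ⟨p.length / 8, ?_⟩
    have : p.length % 8 = 0 := by simp [hpdef]; omega
    omega
  obtain ⟨k, hk⟩ := hk
  rw [chunksJoin_drop, List.drop_zero, blocks_eq k p hk, joinView_eq k p hk]
  apply List.map_congr_left
  intro ch hch
  have hne := chunks_ne_nil k p hk ch hch
  cases ch with
  | nil => exact absurd rfl hne
  | cons c cs => rw [rowA_eq]
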